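-- pv_equiv track=rewrite | github.com/pypi-data/pypi-mirror-385 | packages/dbqt/dbqt-0.1.15-py3-none-any.whl/dbqt/app.py | generate_help_text
-- ===== SOURCE A (Python) =====
-- def generate_help_text(tools, aliases):
--     """Generate dynamic help text based on discovered tools."""
--     help_lines = [
--         "Database Query Tools (dbqt)",
--         "",
--         "Usage: dbqt <command> [args...]",
--         "",
--         "Commands:",
--     ]
--
--     # Create reverse mapping of tool to aliases
--     tool_to_aliases = {}
--     for alias, tool in aliases.items():
--         if tool not in tool_to_aliases:
--             tool_to_aliases[tool] = []
--         tool_to_aliases[tool].append(alias)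
--
--     # Add main tools with their aliases
--     for command, tool in sorted(tools.items()):
--         command_list = [command]
--         if tool in tool_to_aliases:
--             command_list.extend(sorted(tool_to_aliases[tool]))
--
--         commands_str = ", ".join(command_list)
--         help_lines.append(f"  {commands_str:<20} Tool: {tool}")
--
--     help_lines.extend(
--         ["", "Run 'dbqt <command> --help' for detailed help on each command."]
--     )
--
--     return "\n".join(help_lines)
-- ===== SOURCE B (Python) =====
-- def generate_help_text(tools, aliases):
--     """Generate dynamic help text based on discovered tools."""
--     header = [
--         "Database Query Tools (dbqt)",
--         "",
--         "Usage: dbqt <command> [args...]",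
--         "",
--         "Commands:",
--     ]
--     body = []
--     for command, tool in sorted(tools.items()):
--         names = ", ".join([command] + sorted(a for a, t in aliases.items() if t == tool))
--         body.append(f"  {names:<20} Tool: {tool}")
--     footer = ["", "Run 'dbqt <command> --help' for detailed help on each command."]
--     return "\n".join(header + body + footer)
-- ===== Notes on version B (the rewrite author's own statement) =====
-- stated objective: simpler
-- what changed: Drops the pre-built tool-to-aliases reverse dict; for each sorted tool entry the aliases mapping is scanned inline to collect and sort that tool's aliases, and the help text is assembled as header + mapped body + footer.
import Mathlib
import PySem

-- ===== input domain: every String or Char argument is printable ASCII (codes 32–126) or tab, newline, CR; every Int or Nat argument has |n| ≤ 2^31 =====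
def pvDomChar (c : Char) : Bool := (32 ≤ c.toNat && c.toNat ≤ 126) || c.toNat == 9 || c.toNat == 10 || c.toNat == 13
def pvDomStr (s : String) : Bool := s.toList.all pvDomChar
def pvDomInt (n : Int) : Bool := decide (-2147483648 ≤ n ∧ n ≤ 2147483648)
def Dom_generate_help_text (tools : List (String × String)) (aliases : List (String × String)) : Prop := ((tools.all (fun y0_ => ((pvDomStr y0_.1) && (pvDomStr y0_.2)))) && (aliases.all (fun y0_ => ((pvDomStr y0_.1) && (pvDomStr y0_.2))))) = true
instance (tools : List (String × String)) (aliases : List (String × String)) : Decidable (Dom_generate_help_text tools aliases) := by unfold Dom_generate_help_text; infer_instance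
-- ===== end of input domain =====

-- B drops A's pre-built tool-to-aliases reverse dict and instead scans the aliases
-- mapping inline per sorted tool entry (objective: simpler); return values agree everywhere.

-- shared by both ports: the f-string "  {commands_str:<20} Tool: {tool}" (left-justify pad to 20)
def pvHelpLine (names : List String) (tool : String) : String :=
  let cs := (PySem.Str.join ", " names).toList
  String.ofList ((' ' :: ' ' :: cs) ++ List.replicate (20 - cs.length) ' ' ++ " Tool: ".toList ++ tool.toList)

def pvHeader : List String :=
  ["Database Query Tools (dbqt)", "", "Usage: dbqt <command> [args...]", "", "Commands:"]

def pvFooter : List String :=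
  ["", "Run 'dbqt <command> --help' for detailed help on each command."]

-- ===== PORT A =====
def generate_help_text (tools : List (String × String)) (aliases : List (String × String)) : String :=
  let help_lines : List String := pvHeader
  -- 'if tool not in d: d[tool] = []; d[tool].append(alias)' is exactly Dict.modify tool [] (· ++ [alias])
  let tool_to_aliases : PySem.Dict String (List String) :=
    aliases.foldl (fun d p => d.modify p.2 [] (· ++ [p.1])) PySem.Dict.empty
  let help_lines :=
    (PySem.List.sorted2 tools Prod.fst Prod.snd false).foldl (fun hl p =>
      let command_list : List String := [p.1]
      let command_list :=
        if tool_to_aliases.contains p.2 then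
          command_list ++ PySem.List.sorted (tool_to_aliases.getD p.2 []) (fun x => x) false
        else command_list
      hl ++ [pvHelpLine command_list p.2]) help_lines
  let help_lines := help_lines ++ pvFooter
  PySem.Str.join "\n" help_lines

-- ===== PORT B =====
def generate_help_text_alt (tools : List (String × String)) (aliases : List (String × String)) : String :=
  let body : List String :=
    (PySem.List.sorted2 tools Prod.fst Prod.snd false).map (fun p =>
      pvHelpLine
        (p.1 :: PySem.List.sorted ((aliases.filter (fun q => q.2 == p.2)).map Prod.fst) (fun x => x) false)
        p.2)
  PySem.Str.join "\n" (pvHeader ++ body ++ pvFooter)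

-- ===== PRECONDITION & SPEC =====
def Spec_generate_help_text (tools : List (String × String)) (aliases : List (String × String)) (out : String) : Prop := out = generate_help_text_alt tools aliases
instance (tools : List (String × String)) (aliases : List (String × String)) (out : String) : Decidable (Spec_generate_help_text tools aliases out) := by unfold Spec_generate_help_text; infer_instance

-- ===== CLAIM (what is proved, stated in full; the proofs are below) =====
def Claim_equal_generate_help_text : Prop := ∀ (tools : List (String × String)) (aliases : List (String × String)), Dom_generate_help_text tools aliases → Spec_generate_help_text tools aliases (generate_help_text tools aliases)

-- ===== LEMMAS AND PROOFS =====

theorem pv_foldl_append {α β : Type} (f : α → β) (l : List α) (init : List β) :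
    l.foldl (fun hl p => hl ++ [f p]) init = init ++ l.map f := by
  induction l generalizing init with
  | nil => simp
  | cons x xs ih => simp [List.foldl_cons, ih, List.append_assoc]

theorem pv_grouped (aliases : List (String × String)) (t : String) :
    (aliases.foldl (fun d p => d.modify p.2 [] (· ++ [p.1])) PySem.Dict.empty).getD t []
      = (aliases.filter (fun q => q.2 == t)).map Prod.fst := by
  have h : aliases.foldl (fun d p => d.modify p.2 [] (· ++ [p.1])) PySem.Dict.empty
      = (aliases.map (fun p => (p.2, p.1))).foldl (fun d q => d.modify q.1 [] (· ++ [q.2])) PySem.Dict.empty := by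
    rw [List.foldl_map]
  rw [h, PySem.Dict.getD_foldl_modify_append]
  simp [List.filter_map, List.map_map, Function.comp_def]

theorem pv_getD_of_not_contains {κ ν : Type} [BEq κ] [LawfulBEq κ] (d : PySem.Dict κ ν) (k : κ) (dflt : ν)
    (h : d.contains k = false) : d.getD k dflt = dflt := by
  have h2 : d.get? k = none := (PySem.Dict.get?_eq_none_iff_contains d k).mpr h
  simp [PySem.Dict.getD, h2]

theorem pv_line (aliases : List (String × String)) (p : String × String) :
    (if (aliases.foldl (fun d q => d.modify q.2 [] (· ++ [q.1])) PySem.Dict.empty).contains p.2 then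
        [p.1] ++ PySem.List.sorted
          ((aliases.foldl (fun d q => d.modify q.2 [] (· ++ [q.1])) PySem.Dict.empty).getD p.2 [])
          (fun x => x) false
      else [p.1])
    = p.1 :: PySem.List.sorted ((aliases.filter (fun q => q.2 == p.2)).map Prod.fst) (fun x => x) false := by
  by_cases hc : (aliases.foldl (fun d q => d.modify q.2 [] (· ++ [q.1])) PySem.Dict.empty).contains p.2
  · rw [if_pos hc, pv_grouped]
    rfl
  · have hF : (aliases.filter (fun q => q.2 == p.2)).map Prod.fst = [] := by
      rw [← pv_grouped]
      exact pv_getD_of_not_contains _ _ _ (Bool.eq_false_iff.mpr hc)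
    rw [if_neg hc, hF, (PySem.List.sorted_eq_nil_iff _ _ _).mpr rfl]

-- ===== VERDICT (by name: the statement is the Claim_ definition above) =====
theorem generate_help_text_spec : Claim_equal_generate_help_text := by
  intro tools aliases _
  unfold Spec_generate_help_text generate_help_text generate_help_text_alt
  simp only [pv_foldl_append]
  have hmap := List.map_congr_left
    (l := PySem.List.sorted2 tools Prod.fst Prod.snd false)
    (fun p _ => congrArg (fun l => pvHelpLine l p.2) (pv_line aliases p))
  rw [hmap, List.append_assoc]
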